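-- pv_equiv track=rewrite | github.com/minnseong/Algorithm | programmers/Level 2/nightWalkingTactics.py | solution
-- ===== SOURCE A (Python) =====
-- def solution(distance, scope, times):
--
--     answer = distance
--     for i in range(len(scope)):
--         if scope[i][0] > scope[i][1]:
--             scope[i].sort()
--         for j in range(scope[i][0], scope[i][1]+1, 1):
--             if 0 < j % (times[i][0] + times[i][1]) <= times[i][0]:
--                 if answer > j:
--                     answer = j
--     return answer
-- ===== SOURCE B (Python) =====
-- def solution(distance, scope, times):
--     # Per guard, compute the first awake position in [lo, hi] by modular
--     # arithmetic instead of scanning the whole range.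
--     answer = distance
--     for sc, t in zip(scope, times):
--         if sc[0] > sc[1]:
--             lo, hi = sorted(sc)[:2]
--         else:
--             lo, hi = sc[0], sc[1]
--         p = t[0] + t[1]
--         if p <= 0:
--             continue
--         limit = min(t[0], p - 1)
--         if limit < 1:
--             continue
--         r = lo % p
--         if r == 0:
--             cand = lo + 1
--         elif r <= limit:
--             cand = lo
--         else:
--             cand = lo + (p - r) + 1
--         if cand <= hi and cand < answer:
--             answer = cand
--     return answer
-- ===== Notes on version B (the rewrite author's own statement) =====
-- stated objective: faster
-- what changed: Instead of scanning every position of each guard's range and testing j % (work+rest), B computes the first awake position of each guard in O(1) by modular arithmetic and takes the minimum.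
import Mathlib
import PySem

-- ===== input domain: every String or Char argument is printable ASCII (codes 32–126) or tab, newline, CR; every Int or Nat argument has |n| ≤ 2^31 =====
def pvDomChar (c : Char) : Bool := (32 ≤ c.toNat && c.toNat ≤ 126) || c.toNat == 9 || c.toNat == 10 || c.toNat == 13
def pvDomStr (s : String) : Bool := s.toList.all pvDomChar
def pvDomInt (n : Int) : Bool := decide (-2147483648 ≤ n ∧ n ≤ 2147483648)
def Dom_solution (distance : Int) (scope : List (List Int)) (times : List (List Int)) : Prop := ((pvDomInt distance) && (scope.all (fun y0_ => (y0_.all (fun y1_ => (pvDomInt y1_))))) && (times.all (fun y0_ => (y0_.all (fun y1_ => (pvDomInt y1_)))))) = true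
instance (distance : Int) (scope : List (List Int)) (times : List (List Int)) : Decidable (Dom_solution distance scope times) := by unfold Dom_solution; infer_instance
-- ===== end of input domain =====

-- B replaces A's scan of every position of each guard's range by an O(1) modular computation
-- of the first awake position per guard (objective: faster). Python A sorts scope[i] in place
-- when reversed (an observable mutation); B does not mutate — the equivalence proved here is
-- about the RETURN value only.

-- ===== PORT A =====
def solution (distance : Int) (scope : List (List Int)) (times : List (List Int)) : Int :=
  (PySem.List.pyRange 0 (scope.length : Int) 1).foldl (fun answer i =>
    let sc := PySem.List.pyGetD scope i []
    let t := PySem.List.pyGetD times i []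
    -- scope[i].sort() only changes scope[i] itself, which is re-read right below;
    -- the port keeps the (possibly sorted) row locally instead of mutating
    let row := if PySem.List.pyGetD sc 0 0 > PySem.List.pyGetD sc 1 0
               then PySem.List.sorted sc (fun x => x) false else sc
    (PySem.List.pyRange (PySem.List.pyGetD row 0 0) (PySem.List.pyGetD row 1 0 + 1) 1).foldl
      (fun answer j =>
        if 0 < PySem.Int.mod j (PySem.List.pyGetD t 0 0 + PySem.List.pyGetD t 1 0) ∧
           PySem.Int.mod j (PySem.List.pyGetD t 0 0 + PySem.List.pyGetD t 1 0) ≤ PySem.List.pyGetD t 0 0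
        then if answer > j then j else answer
        else answer) answer) distance

-- ===== PORT B =====
def solution_alt (distance : Int) (scope : List (List Int)) (times : List (List Int)) : Int :=
  (scope.zip times).foldl (fun answer pr =>
    let sc := pr.1
    let t := pr.2
    let lh : Int × Int :=
      if PySem.List.pyGetD sc 0 0 > PySem.List.pyGetD sc 1 0 then
        let s := PySem.List.sorted sc (fun x => x) false
        (PySem.List.pyGetD s 0 0, PySem.List.pyGetD s 1 0)
      else (PySem.List.pyGetD sc 0 0, PySem.List.pyGetD sc 1 0)
    let p := PySem.List.pyGetD t 0 0 + PySem.List.pyGetD t 1 0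
    if p ≤ 0 then answer else
    let limit := min (PySem.List.pyGetD t 0 0) (p - 1)
    if limit < 1 then answer else
    let r := PySem.Int.mod lh.1 p
    let cand := if r = 0 then lh.1 + 1 else if r ≤ limit then lh.1 else lh.1 + (p - r) + 1
    if cand ≤ lh.2 ∧ cand < answer then cand else answer) distance

-- ===== PRECONDITION & SPEC =====
-- Pre_ excludes exactly the inputs where Python A raises: a scope row shorter than 2
-- (IndexError), fewer time rows than scope rows or a time row shorter than 2 (IndexError),
-- and a guard with work+rest == 0 (ZeroDivisionError; the inner range is never empty).
def Pre_solution (distance : Int) (scope : List (List Int)) (times : List (List Int)) : Prop :=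
  scope.length ≤ times.length ∧
  ∀ pr ∈ scope.zip times, 2 ≤ pr.1.length ∧ 2 ≤ pr.2.length ∧
    pr.2.getD 0 0 + pr.2.getD 1 0 ≠ 0
instance (distance : Int) (scope : List (List Int)) (times : List (List Int)) : Decidable (Pre_solution distance scope times) := by unfold Pre_solution; infer_instance

def pvWitness_solution : Int × List (List Int) × List (List Int) := (10, [[3, 1]], [[2, 2]])

def Spec_solution (distance : Int) (scope : List (List Int)) (times : List (List Int)) (out : Int) : Prop := out = solution_alt distance scope times
instance (distance : Int) (scope : List (List Int)) (times : List (List Int)) (out : Int) : Decidable (Spec_solution distance scope times out) := by unfold Spec_solution; infer_instance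

-- ===== CLAIM (what is proved, stated in full; the proofs are below) =====
def Claim_equal_solution : Prop := ∀ (distance : Int) (scope : List (List Int)) (times : List (List Int)), Dom_solution distance scope times → Pre_solution distance scope times → Spec_solution distance scope times (solution distance scope times)

-- ===== LEMMAS AND PROOFS =====

-- A's inner-loop step function, abstracted over p = work+rest and w = work
def pvStepA (p w : Int) (answer j : Int) : Int :=
  if 0 < PySem.Int.mod j p ∧ PySem.Int.mod j p ≤ w
  then if answer > j then j else answer
  else answer

theorem pv_foldl_nohit (p w : Int) : ∀ (l : List Int) (ans : Int),
    (∀ j ∈ l, ¬(0 < PySem.Int.mod j p ∧ PySem.Int.mod j p ≤ w)) →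
    l.foldl (pvStepA p w) ans = ans := by
  intro l
  induction l with
  | nil => intro ans _; rfl
  | cons x xs ih =>
    intro ans h
    have hx := h x (by simp)
    simp only [List.foldl_cons, pvStepA, if_neg hx]
    exact ih ans (fun j hj => h j (by simp [hj]))

theorem pv_foldl_nodec (p w : Int) : ∀ (l : List Int) (ans : Int),
    (∀ j ∈ l, ans ≤ j) → l.foldl (pvStepA p w) ans = ans := by
  intro l
  induction l with
  | nil => intro ans _; rfl
  | cons x xs ih =>
    intro ans h
    have hx := h x (by simp)
    have hstep : pvStepA p w ans x = ans := by
      simp only [pvStepA]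
      split
      · rw [if_neg (by omega)]
      · rfl
    simp only [List.foldl_cons, hstep]
    exact ih ans (fun j hj => h j (by simp [hj]))

theorem pv_foldl_firsthit (p w a b c ans : Int) (h1 : a ≤ c) (h2 : c ≤ b)
    (hc : 0 < PySem.Int.mod c p ∧ PySem.Int.mod c p ≤ w)
    (hno : ∀ k, a ≤ k → k < c → ¬(0 < PySem.Int.mod k p ∧ PySem.Int.mod k p ≤ w)) :
    (PySem.List.pyRange a (b+1) 1).foldl (pvStepA p w) ans = if ans > c then c else ans := by
  rw [PySem.List.pyRange_one_append a c (b+1) h1 (by omega), List.foldl_append,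
      PySem.List.pyRange_one_cons (by omega : c < b+1), List.foldl_cons]
  rw [pv_foldl_nohit p w (PySem.List.pyRange a c 1) ans
        (fun j hj => hno j (PySem.List.mem_pyRange_one.mp hj).1 (PySem.List.mem_pyRange_one.mp hj).2)]
  have hstep : pvStepA p w ans c = if ans > c then c else ans := by
    simp only [pvStepA, if_pos hc]
  rw [hstep]
  exact pv_foldl_nodec p w _ _ (fun j hj => by
    have := PySem.List.mem_pyRange_one.mp hj
    split <;> omega)

theorem pv_emod_add_of_lt (p a d : Int) (hd : 0 ≤ d) (h : a % p + d < p) :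
    0 < p → (a + d) % p = a % p + d := by
  intro hp
  have h1 : (a + d) % p = (a % p + d) % p := (Int.emod_add_emod a p d).symm
  have hnn : 0 ≤ a % p := Int.emod_nonneg a (by omega)
  rw [h1, Int.emod_eq_of_lt (by omega) h]

theorem pv_emod_next_zero (p a : Int) (hp : 0 < p) : (a + (p - a % p)) % p = 0 := by
  have hd : a % p = a - p * (a / p) := Int.emod_def a p
  have : a + (p - a % p) = p * (a / p) + p * 1 := by rw [hd]; ring
  rw [this, ← Int.mul_add, Int.mul_emod_right]

theorem pv_pyGetD_zero (t0 t1 : Int) (tr : List Int) :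
    PySem.List.pyGetD (t0 :: t1 :: tr) 0 0 = t0 := by
  have h : (0:Int) ≤ (tr.length : Int) + 1 := by positivity
  simp [PySem.List.pyGetD, PySem.List.pyGet?, PySem.List.pyIdx?, h]

theorem pv_pyGetD_one (t0 t1 : Int) (tr : List Int) :
    PySem.List.pyGetD (t0 :: t1 :: tr) 1 0 = t1 := by
  simp [PySem.List.pyGetD, PySem.List.pyGet?, PySem.List.pyIdx?]

-- the first position ≥ a that the closed form proposes
def pvCand (a p w : Int) : Int :=
  if PySem.Int.mod a p = 0 then a + 1
  else if PySem.Int.mod a p ≤ min w (p-1) then a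
  else a + (p - PySem.Int.mod a p) + 1

-- the per-guard closed form equals A's scan of the whole range
theorem pv_inner_eq (p w a b ans : Int) (hp : p ≠ 0) :
    (PySem.List.pyRange a (b+1) 1).foldl (pvStepA p w) ans
    = (if p ≤ 0 then ans else
       if min w (p-1) < 1 then ans else
       if pvCand a p w ≤ b ∧ pvCand a p w < ans then pvCand a p w else ans) := by
  by_cases hneg : p ≤ 0
  · rw [if_pos hneg]
    refine pv_foldl_nohit p w _ ans (fun j _ h => ?_)
    have := (PySem.Int.mod_neg_bounds (a := j) (b := p) (by omega)).2
    omega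
  · rw [if_neg hneg]
    have hp' : 0 < p := by omega
    have hmod : ∀ j : Int, PySem.Int.mod j p = j % p :=
      fun j => PySem.Int.mod_eq_emod_of_pos (a := j) (b := p) hp'
    by_cases hlim : min w (p-1) < 1
    · rw [if_pos hlim]
      refine pv_foldl_nohit p w _ ans (fun j _ h => ?_)
      obtain ⟨h1, h2⟩ := h
      rw [hmod] at h1 h2
      have hlt : j % p < p := Int.emod_lt_of_pos j hp'
      omega
    · rw [if_neg hlim]
      have hr0 : 0 ≤ a % p := Int.emod_nonneg a (by omega)
      have hr1 : a % p < p := Int.emod_lt_of_pos a hp'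
      have hac : a ≤ pvCand a p w := by
        unfold pvCand; rw [hmod]; split_ifs <;> omega
      have hone : (1 : Int) % p = 1 := Int.emod_eq_of_lt (by omega) (by omega)
      have hcc : 0 < PySem.Int.mod (pvCand a p w) p ∧
                 PySem.Int.mod (pvCand a p w) p ≤ w := by
        unfold pvCand
        simp only [hmod]
        split_ifs with e1 e2
        · rw [pv_emod_add_of_lt p a 1 (by omega) (by omega) hp']
          omega
        · omega
        · have hz := pv_emod_next_zero p a hp'
          rw [show a + (p - a % p) + 1 = (a + (p - a % p)) + 1 by ring,
              pv_emod_add_of_lt p (a + (p - a % p)) 1 (by omega) (by omega) hp']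
          omega
      have hno : ∀ k, a ≤ k → k < pvCand a p w →
          ¬(0 < PySem.Int.mod k p ∧ PySem.Int.mod k p ≤ w) := by
        intro k hk1 hk2 hcond
        obtain ⟨h1, h2⟩ := hcond
        rw [hmod] at h1 h2
        have hklt : k % p < p := Int.emod_lt_of_pos k hp'
        unfold pvCand at hk2
        simp only [hmod] at hk2
        split_ifs at hk2 with e1 e2
        · -- r = 0, k = a
          have hka : k = a := by omega
          rw [hka, e1] at h1
          omega
        · omega
        · -- r > limit: a ≤ k ≤ a + (p - r)
          by_cases hd : k < a + (p - a % p)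
          · have : k % p = a % p + (k - a) := by
              have := pv_emod_add_of_lt p a (k - a) (by omega) (by omega) hp'
              rw [show a + (k - a) = k by ring] at this
              omega
            omega
          · have : k = a + (p - a % p) := by omega
            rw [this, pv_emod_next_zero p a hp'] at h1
            omega
      by_cases hcb : pvCand a p w ≤ b
      · rw [pv_foldl_firsthit p w a b (pvCand a p w) ans hac hcb hcc hno]
        split_ifs <;> omega
      · rw [if_neg (by omega : ¬(pvCand a p w ≤ b ∧ pvCand a p w < ans))]
        refine pv_foldl_nohit p w _ ans (fun j hj h => ?_)
        have hjm := PySem.List.mem_pyRange_one.mp hj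
        exact hno j hjm.1 (by omega) h

theorem pv_body_eq (sc t : List Int) (hsc : 2 ≤ sc.length) (ht : 2 ≤ t.length)
    (hp : t.getD 0 0 + t.getD 1 0 ≠ 0) (ans : Int) :
    (let row := if PySem.List.pyGetD sc 0 0 > PySem.List.pyGetD sc 1 0
                then PySem.List.sorted sc (fun x => x) false else sc
     (PySem.List.pyRange (PySem.List.pyGetD row 0 0) (PySem.List.pyGetD row 1 0 + 1) 1).foldl
       (fun answer j =>
         if 0 < PySem.Int.mod j (PySem.List.pyGetD t 0 0 + PySem.List.pyGetD t 1 0) ∧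
            PySem.Int.mod j (PySem.List.pyGetD t 0 0 + PySem.List.pyGetD t 1 0) ≤ PySem.List.pyGetD t 0 0
         then if answer > j then j else answer
         else answer) ans)
    = (let lh : Int × Int :=
         if PySem.List.pyGetD sc 0 0 > PySem.List.pyGetD sc 1 0 then
           let s := PySem.List.sorted sc (fun x => x) false
           (PySem.List.pyGetD s 0 0, PySem.List.pyGetD s 1 0)
         else (PySem.List.pyGetD sc 0 0, PySem.List.pyGetD sc 1 0)
       let p := PySem.List.pyGetD t 0 0 + PySem.List.pyGetD t 1 0
       if p ≤ 0 then ans else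
       let limit := min (PySem.List.pyGetD t 0 0) (p - 1)
       if limit < 1 then ans else
       let r := PySem.Int.mod lh.1 p
       let cand := if r = 0 then lh.1 + 1 else if r ≤ limit then lh.1 else lh.1 + (p - r) + 1
       if cand ≤ lh.2 ∧ cand < ans then cand else ans) := by
  rcases t with _ | ⟨t0, t⟩
  · simp at ht
  rcases t with _ | ⟨t1, tr⟩
  · simp at ht
  have hpz : PySem.List.pyGetD (t0 :: t1 :: tr) 0 0 + PySem.List.pyGetD (t0 :: t1 :: tr) 1 0 ≠ 0 := by
    rw [pv_pyGetD_zero, pv_pyGetD_one]; simpa using hp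
  by_cases hsort : PySem.List.pyGetD sc 0 0 > PySem.List.pyGetD sc 1 0
  · simp only [if_pos hsort]
    exact pv_inner_eq _ _ _ _ ans hpz
  · simp only [if_neg hsort]
    exact pv_inner_eq _ _ _ _ ans hpz

theorem pv_foldl_index_zip (g : Int → List Int → List Int → Int) :
    ∀ (scope times : List (List Int)), scope.length ≤ times.length → ∀ (init : Int),
    (PySem.List.pyRange 0 (scope.length : Int) 1).foldl
      (fun ans i => g ans (PySem.List.pyGetD scope i []) (PySem.List.pyGetD times i [])) init
    = (scope.zip times).foldl (fun ans pr => g ans pr.1 pr.2) init := by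
  have key : ∀ (sc tm : List (List Int)), sc.length ≤ tm.length → ∀ init,
      (List.range sc.length).foldl
        (fun ans k => g ans (sc.getD k []) (tm.getD k [])) init
      = (sc.zip tm).foldl (fun ans pr => g ans pr.1 pr.2) init := by
    intro sc
    induction sc with
    | nil => intro tm _ init; simp
    | cons x xs ih =>
      intro tm h init
      rcases tm with _ | ⟨y, ys⟩
      · simp at h
      · simp only [List.length_cons, List.range_succ_eq_map, List.foldl_cons, List.foldl_map,
          List.getD_cons_zero, List.getD_cons_succ, List.zip_cons_cons]
        exact ih ys (by simpa using h) (g init x y)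
  intro scope times h init
  rw [PySem.List.pyRange_one]
  simp only [Int.sub_zero, Int.toNat_natCast, List.foldl_map, zero_add,
    PySem.List.pyGetD_natCast]
  exact key scope times h init

-- ===== VERDICT (by name: the statement is the Claim_ definition above) =====
theorem solution_spec : Claim_equal_solution := by
  intro distance scope times _ hpre
  obtain ⟨hlen, hmem⟩ := hpre
  have h1 := pv_foldl_index_zip
    (fun ans sc t =>
      let row := if PySem.List.pyGetD sc 0 0 > PySem.List.pyGetD sc 1 0
                 then PySem.List.sorted sc (fun x => x) false else sc
      (PySem.List.pyRange (PySem.List.pyGetD row 0 0) (PySem.List.pyGetD row 1 0 + 1) 1).foldl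
        (fun answer j =>
          if 0 < PySem.Int.mod j (PySem.List.pyGetD t 0 0 + PySem.List.pyGetD t 1 0) ∧
             PySem.Int.mod j (PySem.List.pyGetD t 0 0 + PySem.List.pyGetD t 1 0) ≤ PySem.List.pyGetD t 0 0
          then if answer > j then j else answer
          else answer) ans)
    scope times hlen distance
  have h2 := PySem.List.foldl_congr_mem
    (l := scope.zip times) (init := distance)
    (h := fun acc pr hpr => by
      obtain ⟨hsc, ht, hp⟩ := hmem pr hpr
      exact pv_body_eq pr.1 pr.2 hsc ht hp acc)
  exact h1.trans h2
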